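-- pv_equiv track=rewrite | github.com/jaloliddin050207-hub/cs101_projects | week6assignment.py | find_top_earning_event
-- ===== SOURCE A (Python) =====
-- def find_top_earning_event(events):
--     top_event_id = events[0][0]
--     top_revenue = events[0][3]
--
--     for event in events:
--         event_id = event[0]
--         revenue = event[3]
--
--         if revenue > top_revenue:
--             top_revenue = revenue
--             top_event_id = event_id
--
--         elif revenue == top_revenue:
--             if event_id < top_event_id:
--                 top_event_id = event_id
--
--     return top_event_id
-- ===== SOURCE B (Python) =====
-- def find_top_earning_event(events):
--     return sorted(events, key=lambda e: (-e[3], e[0]))[0][0]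
-- ===== Notes on version B (the rewrite author's own statement) =====
-- stated objective: idiomatic
-- what changed: Replaces the manual running-max accumulator loop (with explicit tie-breaking branches) by a sort-then-select: sort a copy by (-revenue, id) and return the first element's id.
import Mathlib
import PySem

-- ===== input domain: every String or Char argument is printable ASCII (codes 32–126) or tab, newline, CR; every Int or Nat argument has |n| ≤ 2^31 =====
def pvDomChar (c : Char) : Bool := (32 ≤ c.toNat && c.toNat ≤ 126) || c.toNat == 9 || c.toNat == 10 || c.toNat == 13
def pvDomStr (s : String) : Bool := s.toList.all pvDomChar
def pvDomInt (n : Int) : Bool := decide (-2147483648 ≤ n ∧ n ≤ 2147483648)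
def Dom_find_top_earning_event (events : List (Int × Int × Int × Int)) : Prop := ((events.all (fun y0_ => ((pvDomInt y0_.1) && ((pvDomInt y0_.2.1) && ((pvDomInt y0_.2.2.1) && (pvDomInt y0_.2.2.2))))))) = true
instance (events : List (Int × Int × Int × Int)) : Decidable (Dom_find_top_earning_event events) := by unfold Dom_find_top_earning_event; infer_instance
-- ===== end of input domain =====

-- B replaces A's running-max accumulator loop by an idiomatic sort by (-revenue, id) then take the first id; equal result, not faster.


-- ===== PORT A =====
-- events[0] raises IndexError on []; that input is excluded by Pre_ (the [] branch value is never claimed).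
def find_top_earning_event (events : List (Int × Int × Int × Int)) : Int :=
  match events with
  | [] => 0
  | e0 :: _ =>
    (events.foldl (fun (s : Int × Int) e =>
        let event_id := e.1
        let revenue := e.2.2.2
        if revenue > s.2 then (event_id, revenue)
        else if revenue = s.2 then
          (if event_id < s.1 then (event_id, s.2) else s)
        else s) (e0.1, e0.2.2.2)).1

-- ===== PORT B =====
-- sorted(events, key=lambda e: (-e[3], e[0]))[0][0]; [0] raises IndexError on [], excluded by Pre_.
def find_top_earning_event_alt (events : List (Int × Int × Int × Int)) : Int :=
  match PySem.List.sorted2 events (fun e => -e.2.2.2) (fun e => e.1) with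
  | [] => 0
  | top :: _ => top.1

-- ===== PRECONDITION & SPEC =====
-- Pre_ excludes only the empty list, on which the Python A raises IndexError (events[0]).
def Pre_find_top_earning_event (events : List (Int × Int × Int × Int)) : Prop := events ≠ []
instance (events : List (Int × Int × Int × Int)) : Decidable (Pre_find_top_earning_event events) := by unfold Pre_find_top_earning_event; infer_instance
def pvWitness_find_top_earning_event : (List (Int × Int × Int × Int)) := [(1, 2, 3, 4)]

def Spec_find_top_earning_event (events : List (Int × Int × Int × Int)) (out : Int) : Prop := out = find_top_earning_event_alt events
instance (events : List (Int × Int × Int × Int)) (out : Int) : Decidable (Spec_find_top_earning_event events out) := by unfold Spec_find_top_earning_event; infer_instance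

-- ===== CLAIM (what is proved, stated in full; the proofs are below) =====
def Claim_equal_find_top_earning_event : Prop := ∀ (events : List (Int × Int × Int × Int)), Dom_find_top_earning_event events → Pre_find_top_earning_event events → Spec_find_top_earning_event events (find_top_earning_event events)

-- ===== LEMMAS AND PROOFS =====

-- "(a's id, a's revenue) is strictly better than (b's id, b's revenue)": higher revenue, or equal revenue and smaller id.
def pvBtp (p q : Int × Int) : Prop := q.2 < p.2 ∨ (p.2 = q.2 ∧ p.1 < q.1)

def pvProj (e : Int × Int × Int × Int) : Int × Int := (e.1, e.2.2.2)

theorem pvBtp_trans {p q r : Int × Int} (h1 : pvBtp p q) (h2 : pvBtp q r) : pvBtp p r := by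
  unfold pvBtp at *; omega

theorem pvBtp_irrefl (p : Int × Int) : ¬ pvBtp p p := by unfold pvBtp; omega

-- A's loop step (definitionally equal to the fold body of the port of A)
def pvStep (s : Int × Int) (e : Int × Int × Int × Int) : Int × Int :=
  if e.2.2.2 > s.2 then (e.1, e.2.2.2)
  else if e.2.2.2 = s.2 then (if e.1 < s.1 then (e.1, s.2) else s)
  else s

theorem pvStep_cases (s : Int × Int) (e : Int × Int × Int × Int) :
    (pvStep s e = s ∨ pvStep s e = pvProj e) ∧ (pvStep s e = s ∨ pvBtp (pvStep s e) s)
    ∧ ¬ pvBtp (pvProj e) (pvStep s e) := by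
  unfold pvStep pvProj pvBtp
  split_ifs <;> refine ⟨?_, ?_, ?_⟩ <;> simp [Prod.ext_iff] <;> omega

-- invariant of A's fold: the accumulator is some event's (id, revenue), never worse than the
-- initial one, and no event seen so far beats it
theorem pvFoldA (l : List (Int × Int × Int × Int)) (init : Int × Int) :
    (l.foldl pvStep init = init ∨ ∃ e ∈ l, l.foldl pvStep init = pvProj e)
    ∧ (l.foldl pvStep init = init ∨ pvBtp (l.foldl pvStep init) init)
    ∧ (∀ e ∈ l, ¬ pvBtp (pvProj e) (l.foldl pvStep init)) := by
  induction l generalizing init with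
  | nil => simp
  | cons x l ih =>
    obtain ⟨s1, s2, s3⟩ := pvStep_cases init x
    obtain ⟨m1, m2, m3⟩ := ih (pvStep init x)
    have hg : (x :: l).foldl pvStep init = l.foldl pvStep (pvStep init x) := rfl
    rw [hg]
    refine ⟨?_, ?_, ?_⟩
    · rcases m1 with h | ⟨e, he, hr⟩
      · rcases s1 with h' | h'
        · left; rw [h, h']
        · right; exact ⟨x, List.mem_cons_self .., by rw [h, h']⟩
      · right; exact ⟨e, List.mem_cons_of_mem _ he, hr⟩
    · rcases s2 with h' | h'
      · rw [h']; exact (ih init).2.1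
      · rcases m2 with h | h
        · right; rw [h]; exact h'
        · right; exact pvBtp_trans h h'
    · intro e he hb
      rcases List.mem_cons.mp he with rfl | he
      · rcases m2 with h | h
        · exact s3 (h ▸ hb)
        · exact s3 (pvBtp_trans hb h)
      · exact m3 e he hb

-- B's comparison boolean equals pvBtp on projections
theorem pvBfn_iff (a b : Int × Int × Int × Int) :
    ((decide ((fun e : Int × Int × Int × Int => -e.2.2.2) a < (fun e : Int × Int × Int × Int => -e.2.2.2) b)
      || (!decide ((fun e : Int × Int × Int × Int => -e.2.2.2) b < (fun e : Int × Int × Int × Int => -e.2.2.2) a)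
          && decide ((fun e : Int × Int × Int × Int => e.1) a < (fun e : Int × Int × Int × Int => e.1) b))) = true)
    ↔ pvBtp (pvProj a) (pvProj b) := by
  simp [pvBtp, pvProj]; omega

-- no member of the list beats its head
def pvHeadMin (acc : List (Int × Int × Int × Int)) : Prop :=
  ∀ h t, acc = h :: t → ∀ y ∈ acc, ¬ pvBtp (pvProj y) (pvProj h)

theorem pvHeadMin_insert (bfn : (Int × Int × Int × Int) → (Int × Int × Int × Int) → Bool)
    (hbfn : ∀ a b, bfn a b = true ↔ pvBtp (pvProj a) (pvProj b))
    (x : Int × Int × Int × Int) (acc : List (Int × Int × Int × Int)) (hacc : pvHeadMin acc) :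
    pvHeadMin (PySem.List.insertBy bfn x acc) := by
  cases acc with
  | nil =>
    intro h t hEq y hy
    simp only [PySem.List.insertBy] at hEq hy
    cases hEq
    simp at hy
    subst hy
    exact pvBtp_irrefl _
  | cons h0 t0 =>
    by_cases hb : bfn x h0 = true
    · intro h t hEq y hy
      simp only [PySem.List.insertBy, if_pos hb] at hEq hy
      rw [List.cons.injEq] at hEq
      obtain ⟨rfl, rfl⟩ := hEq
      rcases List.mem_cons.mp hy with rfl | hy
      · exact pvBtp_irrefl _
      · intro hc
        exact hacc h0 t0 rfl y hy (pvBtp_trans hc ((hbfn x h0).mp hb))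
    · intro h t hEq y hy
      simp only [PySem.List.insertBy, if_neg hb] at hEq hy
      rw [List.cons.injEq] at hEq
      obtain ⟨rfl, rfl⟩ := hEq
      rcases List.mem_cons.mp hy with rfl | hy
      · exact hacc y t0 rfl y (List.mem_cons_self ..)
      · rcases (PySem.List.mem_insertBy bfn x y t0).mp hy with rfl | hy
        · exact fun hc => hb ((hbfn y h0).mpr hc)
        · exact hacc h0 t0 rfl y (List.mem_cons_of_mem _ hy)

theorem pvHeadMin_foldl (bfn : (Int × Int × Int × Int) → (Int × Int × Int × Int) → Bool)
    (hbfn : ∀ a b, bfn a b = true ↔ pvBtp (pvProj a) (pvProj b))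
    (l acc : List (Int × Int × Int × Int)) (hacc : pvHeadMin acc) :
    pvHeadMin (l.foldl (fun acc x => PySem.List.insertBy bfn x acc) acc) := by
  induction l generalizing acc with
  | nil => exact hacc
  | cons x l ih => exact ih _ (pvHeadMin_insert bfn hbfn x acc hacc)

-- ===== VERDICT (by name: the statement is the Claim_ definition above) =====
theorem find_top_earning_event_spec : Claim_equal_find_top_earning_event := by
  intro events _ hpre
  unfold Spec_find_top_earning_event
  obtain ⟨e0, rest, rfl⟩ : ∃ e0 rest, events = e0 :: rest := by
    cases events with
    | nil => exact absurd rfl hpre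
    | cons a b => exact ⟨a, b, rfl⟩
  have hperm := PySem.List.sorted2_perm (e0 :: rest) (fun e : Int × Int × Int × Int => -e.2.2.2)
      (fun e : Int × Int × Int × Int => e.1) false
  cases hs : PySem.List.sorted2 (e0 :: rest) (fun e : Int × Int × Int × Int => -e.2.2.2)
      (fun e : Int × Int × Int × Int => e.1) with
  | nil =>
    rw [hs] at hperm
    have := hperm.length_eq
    simp at this
  | cons m tl =>
  rw [hs] at hperm
  have hmin : pvHeadMin (PySem.List.sorted2 (e0 :: rest) (fun e : Int × Int × Int × Int => -e.2.2.2)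
      (fun e : Int × Int × Int × Int => e.1)) := by
    unfold PySem.List.sorted2
    exact pvHeadMin_foldl _ pvBfn_iff (e0 :: rest) [] (by intro h t h'; cases h')
  have hminm : ∀ y ∈ e0 :: rest, ¬ pvBtp (pvProj y) (pvProj m) := by
    intro y hy
    exact hmin m tl hs y (by rw [hs]; exact hperm.mem_iff.mpr hy)
  have hmmem : m ∈ e0 :: rest := hperm.subset (List.mem_cons_self ..)
  obtain ⟨ha1, _, ha3⟩ := pvFoldA (e0 :: rest) (pvProj e0)
  have hAeq : find_top_earning_event (e0 :: rest) = ((e0 :: rest).foldl pvStep (pvProj e0)).1 := rfl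
  have hBeq : find_top_earning_event_alt (e0 :: rest) = m.1 := by
    unfold find_top_earning_event_alt; rw [hs]
  obtain ⟨e, he, hre⟩ : ∃ e ∈ e0 :: rest, (e0 :: rest).foldl pvStep (pvProj e0) = pvProj e := by
    rcases ha1 with h | h
    · exact ⟨e0, List.mem_cons_self .., h⟩
    · exact h
  have h1 : ¬ pvBtp (pvProj e) (pvProj m) := hminm e he
  have h2 : ¬ pvBtp (pvProj m) (pvProj e) := by
    rw [← hre]; exact ha3 m hmmem
  rw [hAeq, hBeq, hre]
  unfold pvBtp pvProj at h1 h2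
  simp only [pvProj]
  omega
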